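-- pv_equiv track=rewrite | github.com/pvparser/PVParser-release | src/attack_detection/method_nnd/raid2024_features.py | _segment_ranges_from_occurrences
-- ===== SOURCE A (Python) =====
-- from typing import Any, Iterable, Optional, Sequence
--
-- def _segment_ranges_from_occurrences(
--     occurrences: Sequence[int],
--     total_packet_count: int,
-- ) -> list[tuple[int, int]]:
--     ranges: list[tuple[int, int]] = []
--     if not occurrences or total_packet_count <= 0:
--         return ranges
--
--     first_occurrence = int(occurrences[0])
--     if first_occurrence > 0:
--         ranges.append((0, first_occurrence))
--
--     for start_index, end_index in zip(occurrences, occurrences[1:]):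
--         if int(end_index) > int(start_index):
--             ranges.append((int(start_index), int(end_index)))
--
--     last_occurrence = int(occurrences[-1])
--     if total_packet_count > last_occurrence:
--         ranges.append((last_occurrence, total_packet_count))
--     return ranges
-- ===== SOURCE B (Python) =====
-- def _segment_ranges_from_occurrences(occurrences, total_packet_count):
--     if not occurrences or total_packet_count <= 0:
--         return []
--     out = []
--     nxt = int(total_packet_count)
--     for cur in reversed(occurrences):
--         cur = int(cur)
--         if nxt > cur:
--             out.append((cur, nxt))
--         nxt = cur
--     if nxt > 0:
--         out.append((0, nxt))
--     out.reverse()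
--     return out
-- ===== Notes on version B (the rewrite author's own statement) =====
-- stated objective: alternative
-- what changed: B builds the result back-to-front: one reverse scan of occurrences carrying the next boundary (starting at total_packet_count) appends segments in reverse and a single final reversal restores order, replacing A's three staged forward appends (leading guard, pairwise zip over a sliced copy, trailing guard).
import Mathlib
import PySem

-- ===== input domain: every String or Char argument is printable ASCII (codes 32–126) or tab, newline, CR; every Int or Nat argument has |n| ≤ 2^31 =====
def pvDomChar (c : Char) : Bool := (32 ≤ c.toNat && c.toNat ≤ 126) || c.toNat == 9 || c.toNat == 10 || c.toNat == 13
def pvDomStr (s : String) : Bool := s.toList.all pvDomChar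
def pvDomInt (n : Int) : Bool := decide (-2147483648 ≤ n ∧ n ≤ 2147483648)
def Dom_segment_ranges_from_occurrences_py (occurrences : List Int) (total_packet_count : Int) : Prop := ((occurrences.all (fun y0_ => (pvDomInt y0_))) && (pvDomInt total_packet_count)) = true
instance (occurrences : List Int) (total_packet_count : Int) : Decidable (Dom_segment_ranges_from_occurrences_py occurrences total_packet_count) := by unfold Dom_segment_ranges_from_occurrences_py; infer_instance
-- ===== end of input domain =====

-- B builds the segment list back-to-front: a reverse scan of occurrences carrying the next
-- boundary, then one final reversal (objective: alternative decomposition; same O(n)).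


-- ===== PORT A =====
def segment_ranges_from_occurrences_py (occurrences : List Int) (total_packet_count : Int) : List (Int × Int) :=
  match occurrences with
  | [] => []
  | first_occurrence :: _ =>
    if total_packet_count ≤ 0 then [] else
    -- ranges = []; if first_occurrence > 0: ranges.append((0, first_occurrence))
    let ranges : List (Int × Int) := if first_occurrence > 0 then [(0, first_occurrence)] else []
    -- for start_index, end_index in zip(occurrences, occurrences[1:]): …
    let ranges := (occurrences.zip occurrences.tail).foldl
      (fun acc p => if p.2 > p.1 then acc ++ [p] else acc) ranges
    -- last_occurrence = occurrences[-1]  (occurrences is nonempty here, so getLastD is exact)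
    let last_occurrence := occurrences.getLastD 0
    if total_packet_count > last_occurrence then ranges ++ [(last_occurrence, total_packet_count)] else ranges

-- ===== PORT B =====
-- the loop body: out.append((cur, nxt)) when nxt > cur; nxt = cur
def srStep (st : Int × List (Int × Int)) (cur : Int) : Int × List (Int × Int) :=
  (cur, if st.1 > cur then st.2 ++ [(cur, st.1)] else st.2)

def segment_ranges_from_occurrences_py_alt (occurrences : List Int) (total_packet_count : Int) : List (Int × Int) :=
  if occurrences = [] ∨ total_packet_count ≤ 0 then [] else
  -- for cur in reversed(occurrences): …
  let st := occurrences.reverse.foldl srStep (total_packet_count, [])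
  -- if nxt > 0: out.append((0, nxt))
  let out := if st.1 > 0 then st.2 ++ [(0, st.1)] else st.2
  out.reverse

-- ===== PRECONDITION & SPEC =====
def Spec_segment_ranges_from_occurrences_py (occurrences : List Int) (total_packet_count : Int) (out : List (Int × Int)) : Prop := out = segment_ranges_from_occurrences_py_alt occurrences total_packet_count
instance (occurrences : List Int) (total_packet_count : Int) (out : List (Int × Int)) : Decidable (Spec_segment_ranges_from_occurrences_py occurrences total_packet_count out) := by unfold Spec_segment_ranges_from_occurrences_py; infer_instance

-- ===== CLAIM (what is proved, stated in full; the proofs are below) =====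
def Claim_equal_segment_ranges_from_occurrences_py : Prop := ∀ (occurrences : List Int) (total_packet_count : Int), Dom_segment_ranges_from_occurrences_py occurrences total_packet_count → Spec_segment_ranges_from_occurrences_py occurrences total_packet_count (segment_ranges_from_occurrences_py occurrences total_packet_count)

-- ===== LEMMAS AND PROOFS =====

-- the reverse scan accumulates, in reverse, the filtered consecutive pairs of l ++ [t],
-- and ends with nxt = the first element of l (or t for empty l)
theorem revfold_eq (l : List Int) (t : Int) (acc : List (Int × Int)) :
    l.reverse.foldl srStep (t, acc)
      = (l.headD t,
         acc ++ (((l ++ [t]).zip (l ++ [t]).tail).filter (fun q => decide (q.2 > q.1))).reverse) := by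
  induction l generalizing acc with
  | nil => simp
  | cons h m ih =>
    have hhead : (m ++ [t]).headD 0 = m.headD t := by cases m <;> simp
    have hzip : ((h :: m ++ [t]).zip (h :: m ++ [t]).tail)
        = (h, (m ++ [t]).headD 0) :: ((m ++ [t]).zip (m ++ [t]).tail) := by
      cases m <;> simp
    simp only [List.reverse_cons, List.foldl_append, List.foldl_cons, List.foldl_nil, ih,
      srStep, hzip, hhead, List.filter_cons]
    split_ifs <;> simp_all <;> omega

-- zipping the padded tail: the extra sentinel at the end contributes exactly (last, t)
theorem zip_pad_last (l : List Int) (a t : Int) :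
    (a :: (l ++ [t])).zip (l ++ [t]) = (a :: l).zip l ++ [((a :: l).getLastD 0, t)] := by
  induction l generalizing a with
  | nil => simp
  | cons b bs ih =>
    simp only [List.cons_append, List.zip_cons_cons, ih b]
    simp [List.getLastD]

-- both sides equal the filtered consecutive pairs of 0 :: occurrences ++ [t]
theorem alt_eq_filter (x : Int) (xs : List Int) (t : Int) (ht : ¬ t ≤ 0) :
    segment_ranges_from_occurrences_py_alt (x :: xs) t
      = ((0 :: (x :: xs ++ [t])).zip (x :: xs ++ [t])).filter (fun q => decide (q.2 > q.1)) := by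
  have hz : ((x :: xs ++ [t]).zip (x :: xs ++ [t]).tail) = ((x :: xs ++ [t]).zip (xs ++ [t])) := by
    simp
  simp only [segment_ranges_from_occurrences_py_alt, reduceCtorEq, ht, or_false, if_false,
    revfold_eq, hz, List.headD_cons, List.nil_append]
  by_cases h1 : x > 0 <;> simp [h1]

theorem a_eq_filter (x : Int) (xs : List Int) (t : Int) (ht : ¬ t ≤ 0) :
    segment_ranges_from_occurrences_py (x :: xs) t
      = ((0 :: (x :: xs ++ [t])).zip (x :: xs ++ [t])).filter (fun q => decide (q.2 > q.1)) := by
  simp only [segment_ranges_from_occurrences_py, if_neg ht,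
    PySem.List.foldl_append_ite_eq_filter, List.cons_append, List.tail_cons,
    List.zip_cons_cons, List.filter_cons, zip_pad_last, List.filter_append]
  by_cases h1 : x > 0 <;> by_cases h2 : (x :: xs).getLast?.getD 0 < t <;>
    simp [h1, h2]

theorem segment_ranges_eq (occurrences : List Int) (total_packet_count : Int) :
    segment_ranges_from_occurrences_py occurrences total_packet_count
      = segment_ranges_from_occurrences_py_alt occurrences total_packet_count := by
  cases occurrences with
  | nil => simp [segment_ranges_from_occurrences_py, segment_ranges_from_occurrences_py_alt]
  | cons x xs =>
    by_cases ht : total_packet_count ≤ 0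
    · simp [segment_ranges_from_occurrences_py, segment_ranges_from_occurrences_py_alt, ht]
    · rw [a_eq_filter x xs _ ht, alt_eq_filter x xs _ ht]

-- ===== VERDICT (by name: the statement is the Claim_ definition above) =====
theorem segment_ranges_from_occurrences_py_spec : Claim_equal_segment_ranges_from_occurrences_py := by
  intro occurrences total_packet_count _
  exact segment_ranges_eq occurrences total_packet_count
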